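-- pv_equiv track=rewrite | github.com/MartinXuc/leetcode-master-learn | 题目文档/第 1 章 数组篇/8. 开发商购买土地/code.20251208.py | min_row_gap
-- ===== SOURCE A (Python) =====
-- def min_row_gap(mat):
--     n = len(mat)
--     prefix_row_sum = [sum(mat[0])]
--     for i in range(1, n):
--         prefix_row_sum.append(prefix_row_sum[i - 1] + sum(mat[i]))
--
--     all_sum = prefix_row_sum[n - 1]
--     min_gap = all_sum
--
--     # 求差值
--     for i in range(n):
--         gap = abs(all_sum - 2 * prefix_row_sum[i])
--         min_gap = min(min_gap, gap)
--
--     return min_gap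
-- ===== SOURCE B (Python) =====
-- def min_row_gap(mat):
--     total = sum(sum(row) for row in mat)
--     min_gap = total
--     running = 0
--     for row in mat:
--         running += sum(row)
--         min_gap = min(min_gap, abs(total - 2 * running))
--     return min_gap
-- ===== Notes on version B (the rewrite author's own statement) =====
-- stated objective: simpler
-- what changed: B replaces A's materialized prefix-sum list plus a second indexed loop with one accumulator pass: compute the grand total, then sweep the rows once keeping a running sum and the minimum |total - 2*running|.
import Mathlib
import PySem

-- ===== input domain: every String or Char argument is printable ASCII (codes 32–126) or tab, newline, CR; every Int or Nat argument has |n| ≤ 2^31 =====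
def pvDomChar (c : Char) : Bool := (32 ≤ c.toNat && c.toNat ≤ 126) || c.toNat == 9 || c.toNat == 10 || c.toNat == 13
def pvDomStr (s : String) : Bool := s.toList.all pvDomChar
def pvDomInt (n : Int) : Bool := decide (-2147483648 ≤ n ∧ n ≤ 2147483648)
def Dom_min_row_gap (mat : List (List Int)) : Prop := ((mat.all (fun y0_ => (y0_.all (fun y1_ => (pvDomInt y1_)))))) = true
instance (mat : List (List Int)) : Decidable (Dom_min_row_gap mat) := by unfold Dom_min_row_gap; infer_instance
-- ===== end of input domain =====

-- B is a single accumulator pass (grand total + running row sum), no prefix-sum list: simpler, O(1) extra space.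

-- ===== PORT A =====
def min_row_gap (mat : List (List Int)) : Int :=
  let n : Int := mat.length
  let ps : List Int :=
    (PySem.List.pyRange 1 n 1).foldl
      (fun ps i => ps ++ [PySem.List.pyGetD ps (i - 1) 0 + (PySem.List.pyGetD mat i []).sum])
      [(PySem.List.pyGetD mat 0 []).sum]
  let all_sum := PySem.List.pyGetD ps (n - 1) 0
  (PySem.List.pyRange 0 n 1).foldl
    (fun mg i => min mg |all_sum - 2 * PySem.List.pyGetD ps i 0|) all_sum

-- ===== PORT B =====
def min_row_gap_alt (mat : List (List Int)) : Int :=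
  let total : Int := mat.foldl (fun acc row => acc + row.sum) 0
  (mat.foldl
    (fun (p : Int × Int) row =>
      let running := p.2 + row.sum
      (min p.1 |total - 2 * running|, running))
    (total, 0)).1

-- ===== PRECONDITION & SPEC =====
-- Pre_ excludes only the empty matrix, on which A raises IndexError (mat[0]).
def Pre_min_row_gap (mat : List (List Int)) : Prop := mat ≠ []
instance (mat : List (List Int)) : Decidable (Pre_min_row_gap mat) := by
  unfold Pre_min_row_gap; infer_instance

def pvWitness_min_row_gap : List (List Int) := [[1, 2], [3]]

def Spec_min_row_gap (mat : List (List Int)) (out : Int) : Prop := out = min_row_gap_alt mat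
instance (mat : List (List Int)) (out : Int) : Decidable (Spec_min_row_gap mat out) := by
  unfold Spec_min_row_gap; infer_instance

-- ===== CLAIM (what is proved, stated in full; the proofs are below) =====
def Claim_equal_min_row_gap : Prop := ∀ (mat : List (List Int)), Dom_min_row_gap mat → Pre_min_row_gap mat → Spec_min_row_gap mat (min_row_gap mat)

-- ===== LEMMAS AND PROOFS =====

/-- Prefix sums of `l` shifted by carry `c`. -/
def prefAux (c : Int) : List Int → List Int
  | [] => []
  | x :: xs => (c + x) :: prefAux (c + x) xs

lemma prefAux_getLast? (c : Int) (l : List Int) (h : l ≠ []) :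
    (prefAux c l).getLast? = some (c + l.sum) := by
  induction l generalizing c with
  | nil => exact absurd rfl h
  | cons x xs ih =>
      cases xs with
      | nil => simp [prefAux]
      | cons y ys =>
          have h2 : prefAux (c + x) (y :: ys) = (c + x + y) :: prefAux (c + x + y) ys := rfl
          rw [prefAux, h2, List.getLast?_cons_cons, ← h2, ih (c + x) (by simp)]
          simp; ring

lemma loop1 (mat : List (List Int)) (k : Nat) (acc : List Int) (c : Int)
    (hk1 : 1 ≤ k) (hkn : k ≤ mat.length) (hlen : acc.length = k)
    (hlast : acc.getLast? = some c) :
    (PySem.List.pyRange (k : Int) (mat.length : Int) 1).foldl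
      (fun ps i => ps ++ [PySem.List.pyGetD ps (i - 1) 0 + (PySem.List.pyGetD mat i []).sum])
      acc
    = acc ++ prefAux c ((mat.drop k).map List.sum) := by
  by_cases h : k = mat.length
  · subst h
    rw [PySem.List.pyRange_one_eq_nil (by omega)]
    simp [prefAux]
  · have hk : k < mat.length := by omega
    rw [PySem.List.pyRange_one_cons (by exact_mod_cast hk)]
    rw [List.foldl_cons]
    have hget : PySem.List.pyGetD acc ((k : Int) - 1) 0 = c := by
      have : ((k : Int) - 1) = ((k - 1 : Nat) : Int) := by omega
      rw [this, PySem.List.pyGetD_natCast]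
      have : acc.getD (k - 1) 0 = c := by
        have hne : acc ≠ [] := by intro h; simp [h] at hlen; omega
        rw [List.getLast?_eq_getElem? ] at hlast
        have : acc[k-1]? = some c := by rw [← hlast]; congr 1; omega
        simp [List.getD, this]
      exact this
    have hmat : PySem.List.pyGetD mat (k : Int) [] = mat[k] := by
      rw [PySem.List.pyGetD_natCast]; simp [List.getD, List.getElem?_eq_getElem hk]
    rw [hget, hmat]
    have hdrop : mat.drop k = mat[k] :: mat.drop (k + 1) := List.drop_eq_getElem_cons hk
    have hrec := loop1 mat (k + 1) (acc ++ [c + mat[k].sum]) (c + mat[k].sum)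
      (by omega) (by omega) (by simp [hlen]) (by simp)
    have hcast : ((k : Int) + 1) = ((k + 1 : Nat) : Int) := by omega
    rw [← hcast] at hrec
    rw [hrec, hdrop]
    have hd : (List.drop k (List.map List.sum mat)) = mat[k].sum :: List.drop (k + 1) (List.map List.sum mat) := by
      rw [← List.map_drop, hdrop, List.map_cons, List.map_drop]
    simp [prefAux, hd]
termination_by mat.length - k

lemma loopB (total : Int) (l : List (List Int)) (mg c : Int) :
    (l.foldl
      (fun (p : Int × Int) row =>
        (min p.1 |total - 2 * (p.2 + row.sum)|, p.2 + row.sum))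
      (mg, c)).1
    = (prefAux c (l.map List.sum)).foldl (fun m p => min m |total - 2 * p|) mg := by
  induction l generalizing mg c with
  | nil => simp [prefAux]
  | cons r t ih => simp [prefAux, ih]

lemma total_eq (mat : List (List Int)) :
    mat.foldl (fun acc row => acc + row.sum) 0 = (mat.map List.sum).sum := by
  have h : ∀ (l : List (List Int)) (a : Int),
      l.foldl (fun acc row => acc + row.sum) a = a + (l.map List.sum).sum := by
    intro l
    induction l with
    | nil => simp
    | cons r t ih => intro a; simp [ih]; ring
  simpa using h mat 0

-- ===== VERDICT (by name: the statement is the Claim_ definition above) =====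
theorem min_row_gap_spec : Claim_equal_min_row_gap := by
  intro mat _ hpre
  simp only [Spec_min_row_gap, min_row_gap, min_row_gap_alt]
  obtain ⟨r, t, rfl⟩ : ∃ r t, mat = r :: t := by
    cases mat with
    | nil => exact absurd rfl hpre
    | cons r t => exact ⟨r, t, rfl⟩
  set mat := r :: t with hmat
  have h1 : 1 ≤ mat.length := by simp [hmat]
  have hps := loop1 mat 1 [(PySem.List.pyGetD mat 0 []).sum] ((PySem.List.pyGetD mat 0 []).sum)
    le_rfl h1 rfl (by simp)
  have hpref : [(PySem.List.pyGetD mat 0 []).sum] ++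
      prefAux ((PySem.List.pyGetD mat 0 []).sum) ((mat.drop 1).map List.sum)
      = prefAux 0 (mat.map List.sum) := by
    simp [hmat, prefAux]
  simp only [Int.natCast_one] at hps
  rw [hps, hpref]
  set pref := prefAux 0 (mat.map List.sum) with hprefdef
  have hlenpref : pref.length = mat.length := by
    have : ∀ (c : Int) (l : List Int), (prefAux c l).length = l.length := by
      intro c l; induction l generalizing c with
      | nil => rfl
      | cons x xs ih => simp [prefAux, ih]
    simp [hprefdef, this]
  set T : Int := (mat.map List.sum).sum with hT
  have hall : PySem.List.pyGetD pref ((mat.length : Int) - 1) 0 = T := by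
    have hlastp : pref.getLast? = some T := by
      rw [hprefdef, prefAux_getLast? 0 _ (by simp [hmat])]
      simp [hT]
    have hc : ((mat.length : Int) - 1) = ((mat.length - 1 : Nat) : Int) := by omega
    rw [hc, PySem.List.pyGetD_natCast]
    rw [List.getLast?_eq_getElem?] at hlastp
    have : pref[mat.length - 1]? = some T := by rw [← hlastp]; congr 1; omega
    simp [List.getD, this]
  rw [hall]
  have hloop2 : (PySem.List.pyRange 0 (mat.length : Int) 1).foldl
      (fun mg i => min mg |T - 2 * PySem.List.pyGetD pref i 0|) T
      = pref.foldl (fun mg p => min mg |T - 2 * p|) T := by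
    rw [show ((mat.length : Int)) = ((pref.length : Int)) by rw [hlenpref]]
    exact PySem.List.foldl_pyRange_zero_pyGetD pref 0 (fun mg p => min mg |T - 2 * p|) T
  rw [hloop2]
  rw [total_eq, ← hT]
  rw [loopB T mat T 0]
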